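-- pv_equiv track=rewrite | github.com/pypi-data/pypi-mirror-356 | packages/traxgen/traxgen-0.1.4-py3-none-any.whl/traxgen/utils.py | split_trajectory_by_agent
-- ===== SOURCE A (Python) =====
-- from typing import TypedDict, List, Dict, Any, Union
--
-- def split_trajectory_by_agent(flat_trajectory: List[str]) -> Dict[str, List[str]]:
--     split = {}
--     current_agent = None
--
--     for item in flat_trajectory:
--         if item.endswith("_agent"):
--             # current_agent = item.replace("_agent", "")
--             current_agent = normalize_agent_name(item)
--             # current_agent = item
--
--             split[current_agent] = []
--         else:
--             if current_agent is None:
--                 raise ValueError("Tool step encountered before any agent declaration.")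
--             split[current_agent].append(item)
--
--     return split
--
-- def normalize_agent_name(name: str) -> str:
--     return name if name.endswith("_agent") else f"{name}_agent"
-- ===== SOURCE B (Python) =====
-- def split_trajectory_by_agent(flat_trajectory):
--     # Two-phase: chunk the list into (agent, tool-steps) pairs, then build the
--     # dict in one shot (dict() keeps first-insertion order, last value wins).
--     if flat_trajectory and not flat_trajectory[0].endswith("_agent"):
--         raise ValueError("Tool step encountered before any agent declaration.")
--     pairs = []
--     rest = flat_trajectory
--     while rest:
--         head, tail = rest[0], rest[1:]
--         k = 0
--         while k < len(tail) and not tail[k].endswith("_agent"):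
--             k += 1
--         pairs.append((head, tail[:k]))
--         rest = tail[k:]
--     return dict(pairs)
-- ===== Notes on version B (the rewrite author's own statement) =====
-- stated objective: alternative
-- what changed: Replaces A's single-pass state machine (current_agent sentinel, dict mutated on every item) by a two-phase chunking: split the list into (agent, following-tools) pairs by scanning to the next agent boundary, then build the dict from the pair list in one shot.
import Mathlib
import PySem

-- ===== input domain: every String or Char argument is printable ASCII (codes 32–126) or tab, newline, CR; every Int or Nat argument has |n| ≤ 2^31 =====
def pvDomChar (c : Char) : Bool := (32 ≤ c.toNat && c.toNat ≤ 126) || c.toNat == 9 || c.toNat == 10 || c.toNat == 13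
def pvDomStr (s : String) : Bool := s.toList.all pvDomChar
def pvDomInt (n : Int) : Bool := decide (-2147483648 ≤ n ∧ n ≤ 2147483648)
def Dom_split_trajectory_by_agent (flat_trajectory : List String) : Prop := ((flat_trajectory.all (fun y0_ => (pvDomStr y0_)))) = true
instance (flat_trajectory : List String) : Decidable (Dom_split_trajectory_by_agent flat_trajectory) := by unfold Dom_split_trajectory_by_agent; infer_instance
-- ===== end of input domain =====

-- B replaces A's single-pass state machine by boundary-chunking into (agent, tools) pairs then one dict build (alternative decomposition; return value only, no mutation involved).

-- ===== PORT A =====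
def pvIsAgent (s : String) : Bool := PySem.Str.endswith s "_agent"

def pvNormalize (name : String) : String :=
  if PySem.Str.endswith name "_agent" then name else name ++ "_agent"

-- the for-loop of A; `none` = the ValueError path (excluded by Pre_)
def pvLoopA : List String → PySem.Dict String (List String) → Option String →
    Option (PySem.Dict String (List String))
  | [], split, _ => some split
  | item :: rest, split, cur =>
    if pvIsAgent item then
      let a := pvNormalize item
      pvLoopA rest (split.insert a []) (some a)
    else
      match cur with
      | none => none
      | some a => pvLoopA rest (split.modify a [] (fun l => l ++ [item])) (some a)

def split_trajectory_by_agent (flat_trajectory : List String) : List (String × List String) :=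
  ((pvLoopA flat_trajectory PySem.Dict.empty none).getD PySem.Dict.empty).items

-- ===== PORT B =====
-- outer while-loop of Source B: one (head, tail[:k]) pair per agent boundary; the
-- inner `while k` loop scans to the next agent, i.e. tail[:k] = takeWhile non-agent,
-- tail[k:] = dropWhile non-agent (exact: the loop advances k over exactly that prefix)
def pvChunks : List String → List (String × List String)
  | [] => []
  | head :: tail =>
    (head, tail.takeWhile (fun t => !pvIsAgent t)) ::
      pvChunks (tail.dropWhile (fun t => !pvIsAgent t))
termination_by l => l.length
decreasing_by
  have h := List.length_dropWhile_le (fun t => !pvIsAgent t) tail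
  simp only [List.length_cons]; omega

def split_trajectory_by_agent_alt (flat_trajectory : List String) : List (String × List String) :=
  (PySem.Dict.ofList (pvChunks flat_trajectory)).items

-- ===== PRECONDITION & SPEC =====
-- A raises ValueError exactly when the first item is a tool step (does not end with "_agent"); B raises there too.
def Pre_split_trajectory_by_agent (flat_trajectory : List String) : Prop :=
  PySem.Str.endswith (flat_trajectory.headD "_agent") "_agent" = true
instance (flat_trajectory : List String) : Decidable (Pre_split_trajectory_by_agent flat_trajectory) := by
  unfold Pre_split_trajectory_by_agent; infer_instance

def pvWitness_split_trajectory_by_agent : List String :=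
  ["planner_agent", "search", "summarize", "writer_agent", "draft"]

def Spec_split_trajectory_by_agent (flat_trajectory : List String) (out : List (String × List String)) : Prop := out = split_trajectory_by_agent_alt flat_trajectory
instance (flat_trajectory : List String) (out : List (String × List String)) : Decidable (Spec_split_trajectory_by_agent flat_trajectory out) := by unfold Spec_split_trajectory_by_agent; infer_instance

-- ===== CLAIM (what is proved, stated in full; the proofs are below) =====
def Claim_equal_split_trajectory_by_agent : Prop := ∀ (flat_trajectory : List String), Dom_split_trajectory_by_agent flat_trajectory → Pre_split_trajectory_by_agent flat_trajectory → Spec_split_trajectory_by_agent flat_trajectory (split_trajectory_by_agent flat_trajectory)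

-- ===== LEMMAS AND PROOFS =====

theorem pv_head_dropWhile {p : String → Bool} :
    ∀ (l : List String) (h : String), (l.dropWhile p).head? = some h → p h = false := by
  intro l
  induction l with
  | nil => intro h hh; simp [List.dropWhile] at hh
  | cons x xs ih =>
    intro h hh
    by_cases hx : p x
    · exact ih h (by simpa [List.dropWhile, hx] using hh)
    · simp [List.dropWhile, hx] at hh
      simpa [hh] using hx

-- processing a run of non-agent tool steps just extends the current agent's list
theorem pvLoopA_tools :
    ∀ (seg : List String), (∀ t ∈ seg, pvIsAgent t = false) →
    ∀ (rest : List String) (d : PySem.Dict String (List String)) (a : String) (v : List String),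
      pvLoopA (seg ++ rest) (d.insert a v) (some a) = pvLoopA rest (d.insert a (v ++ seg)) (some a) := by
  intro seg
  induction seg with
  | nil => intro _ rest d a v; simp
  | cons t seg' ih =>
    intro hseg rest d a v
    have ht : pvIsAgent t = false := hseg t (List.mem_cons_self ..)
    have hmod : (d.insert a v).modify a [] (fun l => l ++ [t]) = d.insert a (v ++ [t]) := by
      simp [PySem.Dict.modify, PySem.Dict.getD_insert_self, PySem.Dict.insert_insert_self]
    simp only [List.cons_append, pvLoopA, ht, Bool.false_eq_true, if_false, hmod]
    rw [ih (fun x hx => hseg x (List.mem_cons_of_mem _ hx)) rest d a (v ++ [t])]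
    simp

theorem pvLoopA_eq_chunks_aux :
    ∀ (n : Nat) (xs : List String), xs.length ≤ n → (∀ h, xs.head? = some h → pvIsAgent h = true) →
    ∀ (d : PySem.Dict String (List String)) (cur : Option String),
      pvLoopA xs d cur = some ((pvChunks xs).foldl (fun d p => d.insert p.1 p.2) d) := by
  intro n
  induction n with
  | zero =>
    intro xs hlen _ d cur
    have : xs = [] := List.eq_nil_of_length_eq_zero (Nat.le_zero.mp hlen)
    subst this; simp [pvLoopA, pvChunks]
  | succ n ihn =>
    intro xs hlen hhead d cur
    match xs with
    | [] => simp [pvLoopA, pvChunks]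
    | x :: tl =>
    have ih := fun hh => ihn (tl.dropWhile (fun t => !pvIsAgent t))
      (le_trans (List.length_dropWhile_le _ tl) (by simpa using Nat.lt_succ_iff.mp (by simpa using hlen))) hh
    have hx : pvIsAgent x = true := hhead x rfl
    have hx' : PySem.Str.endswith x "_agent" = true := hx
    have hnorm : pvNormalize x = x := by
      simp only [pvNormalize, hx', if_true]
    set p : String → Bool := (fun t => !pvIsAgent t) with hp
    have hdecomp : tl.takeWhile p ++ tl.dropWhile p = tl := List.takeWhile_append_dropWhile
    have hseg : ∀ t ∈ tl.takeWhile p, pvIsAgent t = false := by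
      intro t htk
      have := List.mem_takeWhile_imp htk
      simpa [hp] using this
    have hresthead : ∀ h, (tl.dropWhile p).head? = some h → pvIsAgent h = true := by
      intro h hh
      have := pv_head_dropWhile (p := p) tl h hh
      simpa [hp] using this
    simp only [pvLoopA, hx, if_true, hnorm]
    rw [← hdecomp, pvLoopA_tools (tl.takeWhile p) hseg (tl.dropWhile p) d x [],
        List.nil_append, ih hresthead]
    simp only [pvChunks, hp]
    rw [hdecomp]
    rfl

-- ===== VERDICT (by name: the statement is the Claim_ definition above) =====
theorem split_trajectory_by_agent_spec : Claim_equal_split_trajectory_by_agent := by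
  intro ft _ hpre
  unfold Spec_split_trajectory_by_agent split_trajectory_by_agent split_trajectory_by_agent_alt
  have hhead : ∀ h, ft.head? = some h → pvIsAgent h = true := by
    intro h hh
    cases ft with
    | nil => simp at hh
    | cons a tl =>
      simp at hh
      subst hh
      simpa [Pre_split_trajectory_by_agent, pvIsAgent] using hpre
  rw [pvLoopA_eq_chunks_aux ft.length ft le_rfl hhead PySem.Dict.empty none]
  rfl
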